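-- pv_equiv track=rewrite | github.com/KIMSEULBEEN/problem-solving | Programmers/2022 KAKAO RECRUITMENT/problem1.py | solution
-- ===== SOURCE A (Python) =====
-- def solution(id_list, report, k):
--     id_dict = dict()
--     answer = dict()
--     for id in id_list:
--         id_dict[id] = [0, []]
--         answer[id] = 0
--
--     report = list(set(report))
--     for rep in report:
--         id_report, id_reported = list(rep.split(' '))
--         id_dict[id_reported][0] += 1
--         id_dict[id_reported][1].append(id_report)
--
--
--     for id in id_dict.keys():
--         k_tmp, id_list_tmp = id_dict[id]
--         if k_tmp >= k:
--             for id in id_list_tmp: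
--                 answer[id] += 1
--
--     answer = list(answer.values())
--     return answer
-- ===== SOURCE B (Python) =====
-- def solution(id_list, report, k):
--     reports = set(report)
--     counts = {}
--     for rep in reports:
--         reported = rep.split(' ')[1]
--         counts[reported] = counts.get(reported, 0) + 1
--     blocked = {u for u, c in counts.items() if c >= k}
--     answer = {u: 0 for u in id_list}
--     for rep in reports:
--         reporter, reported = rep.split(' ')
--         if reported in blocked:
--             answer[reporter] += 1
--     return list(answer.values())
-- ===== Notes on version B (the rewrite author's own statement) =====
-- stated objective: simpler
-- what changed: B keeps only a per-user report count (no per-user reporter lists), derives a blocked set once, and replaces A's user-then-reporter-list double loop with a single pass over the deduplicated reports incrementing answer[reporter] when the reported user is blocked.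
import Mathlib
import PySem

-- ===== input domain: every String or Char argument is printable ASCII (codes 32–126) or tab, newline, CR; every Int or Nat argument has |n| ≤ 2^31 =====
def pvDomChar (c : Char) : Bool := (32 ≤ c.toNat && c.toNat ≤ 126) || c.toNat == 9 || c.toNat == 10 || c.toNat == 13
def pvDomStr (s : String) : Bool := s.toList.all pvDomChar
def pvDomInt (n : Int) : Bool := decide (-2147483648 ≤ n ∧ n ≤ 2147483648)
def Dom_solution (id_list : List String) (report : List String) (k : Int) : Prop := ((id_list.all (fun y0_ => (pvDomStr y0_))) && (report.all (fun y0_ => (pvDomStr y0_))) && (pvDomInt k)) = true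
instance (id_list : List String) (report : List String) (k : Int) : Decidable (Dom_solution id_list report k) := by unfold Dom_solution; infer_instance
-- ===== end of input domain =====

-- B replaces A's per-user reporter lists and user-then-reporter-list double loop by plain
-- report counts, a precomputed blocked set, and one pass over the deduplicated reports ("simpler").

-- rep.split(' '): sep is nonempty, so Python's split always returns (split? is some)
def pvParts (rep : String) : List String := (PySem.Str.split? rep " ").getD []

-- ===== PORT A =====
-- one step of A's second loop ('id_report, id_reported = rep.split(' '); id_dict[id_reported][0] += 1; …[1].append(…)');
-- none = the ValueError (not exactly two tokens) / KeyError (unknown reported user) Python raises there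
def pvStepDict (st : Option (PySem.Dict String (Int × List String))) (rep : String) :
    Option (PySem.Dict String (Int × List String)) :=
  match st with
  | none => none
  | some d =>
    match pvParts rep with
    | [id_report, id_reported] =>
      match d.get? id_reported with
      | some cl => some (d.insert id_reported (cl.1 + 1, cl.2 ++ [id_report]))
      | none => none
    | _ => none

-- 'answer[id] += 1' (none = KeyError)
def pvIncr (st : Option (PySem.Dict String Int)) (id : String) : Option (PySem.Dict String Int) :=
  match st with
  | none => none
  | some a => if a.contains id then some (a.modify id 0 (· + 1)) else none

def solution (id_list : List String) (report : List String) (k : Int) : List Int :=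
  let init := id_list.foldl
    (fun (p : PySem.Dict String (Int × List String) × PySem.Dict String Int) id =>
      (p.1.insert id (0, []), p.2.insert id 0))
    (PySem.Dict.empty, PySem.Dict.empty)
  let report' : PySem.Set String := PySem.Set.ofList report   -- report = list(set(report))
  let id_dict? := report'.foldl pvStepDict (some init.1)
  match id_dict? with
  | none => []          -- Python raised; unreachable under Pre_
  | some id_dict =>
    let answer? := id_dict.keys.foldl
      (fun st id =>
        match id_dict.get? id with
        | some cl => if cl.1 ≥ k then cl.2.foldl pvIncr st else st
        | none => none)   -- unreachable: keys of the same dict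
      (some init.2)
    match answer? with
    | none => []        -- Python raised; unreachable under Pre_
    | some answer => answer.values

-- ===== PORT B =====
-- counts[reported] = counts.get(reported, 0) + 1 after reported = rep.split(' ')[1]  (none = IndexError)
def pvStepCount (st : Option (PySem.Dict String Int)) (rep : String) : Option (PySem.Dict String Int) :=
  match st with
  | none => none
  | some c =>
    match PySem.List.pyGet? (pvParts rep) 1 with
    | some reported => some (c.insert reported (c.getD reported 0 + 1))
    | none => none

-- one step of B's second loop (none = ValueError / KeyError)
def pvStepAns (blocked : PySem.Set String) (st : Option (PySem.Dict String Int)) (rep : String) :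
    Option (PySem.Dict String Int) :=
  match st with
  | none => none
  | some a =>
    match pvParts rep with
    | [reporter, reported] =>
      if PySem.Set.contains blocked reported then
        if a.contains reporter then some (a.modify reporter 0 (· + 1)) else none
      else some a
    | _ => none

def solution_alt (id_list : List String) (report : List String) (k : Int) : List Int :=
  let reports : PySem.Set String := PySem.Set.ofList report
  let counts? := reports.foldl pvStepCount (some PySem.Dict.empty)
  match counts? with
  | none => []          -- Python raised; unreachable under Pre_
  | some counts =>
    let blocked : PySem.Set String :=
      PySem.Set.ofList ((counts.items.filter (fun p => p.2 ≥ k)).map (·.1))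
    let answer0 := id_list.foldl (fun (a : PySem.Dict String Int) u => a.insert u 0) PySem.Dict.empty
    let answer? := reports.foldl (pvStepAns blocked) (some answer0)
    match answer? with
    | none => []        -- Python raised; unreachable under Pre_
    | some answer => answer.values

-- ===== PRECONDITION & SPEC =====
-- accessors used only by Pre_ and the proofs (never by the ports)
def pvRer (rep : String) : String := (pvParts rep).headI
def pvRed (rep : String) : String := ((pvParts rep)[1]?).getD ""
-- number of distinct reports naming u
def pvCnt (report : List String) (u : String) : Int :=
  ((PySem.Set.ofList report).countP (fun rep => pvRed rep == u) : Int)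

-- Exactly the inputs on which A returns (otherwise Python raises ValueError/KeyError): every report
-- splits on ' ' into exactly two tokens, the reported user is a known id, and the reporter is a known
-- id unless the reported user stays below the threshold (then A never looks the reporter up).
def Pre_solution (id_list : List String) (report : List String) (k : Int) : Prop :=
  ∀ rep ∈ report, (pvParts rep).length = 2 ∧ pvRed rep ∈ id_list ∧
    (pvRer rep ∈ id_list ∨ pvCnt report (pvRed rep) < k)
instance (id_list : List String) (report : List String) (k : Int) : Decidable (Pre_solution id_list report k) := by unfold Pre_solution; infer_instance

def pvWitness_solution : List String × List String × Int :=
  (["muzi", "frodo", "apeach"], ["muzi frodo", "apeach frodo", "muzi apeach"], 2)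

def Spec_solution (id_list : List String) (report : List String) (k : Int) (out : List Int) : Prop := out = solution_alt id_list report k
instance (id_list : List String) (report : List String) (k : Int) (out : List Int) : Decidable (Spec_solution id_list report k out) := by unfold Spec_solution; infer_instance

-- ===== CLAIM (what is proved, stated in full; the proofs are below) =====
def Claim_equal_solution : Prop := ∀ (id_list : List String) (report : List String) (k : Int), Dom_solution id_list report k → Pre_solution id_list report k → Spec_solution id_list report k (solution id_list report k)

-- ===== LEMMAS AND PROOFS =====

-- abbreviations for the proofs
def pvIncrD (a : PySem.Dict String Int) (r : String) : PySem.Dict String Int := a.modify r 0 (· + 1)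
def pvGA (d : PySem.Dict String (Int × List String)) (rep : String) : PySem.Dict String (Int × List String) :=
  d.insert (pvRed rep) ((d.getD (pvRed rep) (0, [])).1 + 1, (d.getD (pvRed rep) (0, [])).2 ++ [pvRer rep])
def pvGC (c : PySem.Dict String Int) (rep : String) : PySem.Dict String Int :=
  c.insert (pvRed rep) (c.getD (pvRed rep) 0 + 1)
def pvGB (blocked : PySem.Set String) (a : PySem.Dict String Int) (rep : String) : PySem.Dict String Int :=
  if PySem.Set.contains blocked (pvRed rep) then pvIncrD a (pvRer rep) else a

lemma pv_parts_eq {rep : String} (h : (pvParts rep).length = 2) :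
    pvParts rep = [pvRer rep, pvRed rep] := by
  rcases hp : pvParts rep with _ | ⟨a, _ | ⟨b, _ | ⟨c, t⟩⟩⟩ <;> simp [hp] at h ⊢ <;>
    simp [pvRer, pvRed, hp]

lemma pv_set_update_self (s : PySem.Set String) (xs : List String) (h : ∀ x ∈ xs, x ∈ s) :
    PySem.Set.update s xs = s := by
  rw [PySem.Set.update_eq_append_filter]
  have hnil : List.filter (fun y => !s.contains y) (PySem.Set.ofList xs) = [] := by
    rw [List.filter_eq_nil_iff]
    intro y hy
    have hm : y ∈ s := h y ((PySem.Set.mem_ofList xs y).1 hy)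
    simp [hm]
  rw [hnil, List.append_nil]

lemma pv_get?_foldl_insert_const {ν : Type} (v : ν) :
    ∀ (l : List String) (d : PySem.Dict String ν) (u : String),
      (l.foldl (fun d x => d.insert x v) d).get? u = if u ∈ l then some v else d.get? u := by
  intro l
  induction l with
  | nil => simp
  | cons x t ih =>
    intro d u
    simp only [List.foldl_cons, ih, List.mem_cons]
    by_cases hu : u ∈ t
    · simp [hu]
    · by_cases hx : u = x <;> simp [hu, hx, PySem.Dict.get?_insert]

-- A's second loop returns (no exception) and is the clean fold pvGA
lemma pv_stepDict_fold :
    ∀ (L : List String) (d : PySem.Dict String (Int × List String)),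
      (∀ rep ∈ L, (pvParts rep).length = 2 ∧ d.contains (pvRed rep) = true) →
      L.foldl pvStepDict (some d) = some (L.foldl pvGA d) := by
  intro L
  induction L with
  | nil => simp
  | cons rep t ih =>
    intro d h
    obtain ⟨h2, hc⟩ := h rep (by simp)
    have hget : d.get? (pvRed rep) = some (d.getD (pvRed rep) (0, [])) := by
      rw [PySem.Dict.contains_eq_isSome_get?] at hc
      rcases hg : d.get? (pvRed rep) with _ | v
      · simp [hg] at hc
      · simp [PySem.Dict.getD_eq_get?_getD, hg]
    simp only [List.foldl_cons]
    have hstep : pvStepDict (some d) rep = some (pvGA d rep) := by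
      simp only [pvStepDict, pv_parts_eq h2, hget]
      rfl
    rw [hstep]
    apply ih
    intro r hr
    refine ⟨(h r (by simp [hr])).1, ?_⟩
    simp [pvGA, PySem.Dict.contains_insert, (h r (by simp [hr])).2]

lemma pv_gA_getD :
    ∀ (L : List String) (d : PySem.Dict String (Int × List String)) (u : String),
      (L.foldl pvGA d).getD u (0, []) =
        ((d.getD u (0, [])).1 + (L.countP (fun rep => pvRed rep == u) : Int),
         (d.getD u (0, [])).2 ++ (L.filter (fun rep => pvRed rep == u)).map pvRer) := by
  intro L
  induction L with
  | nil => simp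
  | cons rep t ih =>
    intro d u
    simp only [List.foldl_cons, ih, List.countP_cons, List.filter_cons]
    by_cases hu : pvRed rep = u
    · subst hu
      have hg : (pvGA d rep).getD (pvRed rep) (0, []) =
          ((d.getD (pvRed rep) (0, [])).1 + 1, (d.getD (pvRed rep) (0, [])).2 ++ [pvRer rep]) := by
        simp [pvGA, PySem.Dict.getD_insert]
      rw [hg]
      refine Prod.ext ?_ ?_
      · simp only [beq_self_eq_true, if_true]
        push_cast
        ring
      · simp [List.map_cons]
    · have hb : (pvRed rep == u) = false := by simp [hu]
      have hg : (pvGA d rep).getD u (0, []) = d.getD u (0, []) := by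
        simp [pvGA, PySem.Dict.getD_insert, Ne.symm hu]
      rw [hg]
      simp [hb]

lemma pv_gA_keys (L : List String) (d : PySem.Dict String (Int × List String))
    (h : ∀ rep ∈ L, pvRed rep ∈ d.keys) :
    (L.foldl pvGA d).keys = d.keys := by
  have := PySem.Dict.keys_foldl_insert_key L pvRed
    (fun d rep => ((d.getD (pvRed rep) (0, [])).1 + 1, (d.getD (pvRed rep) (0, [])).2 ++ [pvRer rep])) d
  rw [show (fun (d : PySem.Dict String (Int × List String)) (rep : String) =>
        d.insert (pvRed rep) ((d.getD (pvRed rep) (0, [])).1 + 1, (d.getD (pvRed rep) (0, [])).2 ++ [pvRer rep])) = pvGA from rfl] at this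
  rw [this]
  apply pv_set_update_self
  intro x hx
  obtain ⟨rep, hrep, hred⟩ := List.mem_map.1 hx
  exact hred ▸ h rep hrep

-- B's first loop returns and is the clean fold pvGC
lemma pv_stepCount_fold :
    ∀ (L : List String) (c : PySem.Dict String Int),
      (∀ rep ∈ L, (pvParts rep).length = 2) →
      L.foldl pvStepCount (some c) = some (L.foldl pvGC c) := by
  intro L
  induction L with
  | nil => simp
  | cons rep t ih =>
    intro c h
    have h2 := h rep (by simp)
    have hget : PySem.List.pyGet? (pvParts rep) 1 = some (pvRed rep) := by
      rw [pv_parts_eq h2]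
      simp [PySem.List.pyGet?, PySem.List.pyIdx?]
    simp only [List.foldl_cons]
    have hstep : pvStepCount (some c) rep = some (pvGC c rep) := by
      simp [pvStepCount, hget, pvGC]
    rw [hstep, ih _ (fun r hr => h r (by simp [hr]))]

lemma pv_gC_getD (L : List String) (c : PySem.Dict String Int) (u : String) :
    (L.foldl pvGC c).getD u 0 = c.getD u 0 + (L.countP (fun rep => pvRed rep == u) : Int) := by
  have h1 : L.foldl pvGC c = (L.map pvRed).foldl (fun c x => c.insert x (c.getD x 0 + 1)) c := by
    simp only [List.foldl_map]
    rfl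
  rw [h1, PySem.Dict.getD_foldl_insert_add_one, List.count, List.countP_map]
  rfl

-- B's second loop returns and is the clean fold pvGB
lemma pv_stepAns_fold (blocked : PySem.Set String) :
    ∀ (L : List String) (a : PySem.Dict String Int),
      (∀ rep ∈ L, (pvParts rep).length = 2 ∧
        (PySem.Set.contains blocked (pvRed rep) = true → a.contains (pvRer rep) = true)) →
      L.foldl (pvStepAns blocked) (some a) = some (L.foldl (pvGB blocked) a) := by
  intro L
  induction L with
  | nil => simp
  | cons rep t ih =>
    intro a h
    obtain ⟨h2, hc⟩ := h rep (by simp)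
    simp only [List.foldl_cons]
    have hstep : pvStepAns blocked (some a) rep = some (pvGB blocked a rep) := by
      by_cases hb : pvRed rep ∈ blocked
      · have hcc := hc (by simp [hb])
        simp [pvStepAns, pv_parts_eq h2, hb, hcc, pvGB, pvIncrD]
      · simp [pvStepAns, pv_parts_eq h2, hb, pvGB]
    rw [hstep]
    apply ih
    intro r hr
    refine ⟨(h r (by simp [hr])).1, fun hb => ?_⟩
    have hcr := (h r (by simp [hr])).2 hb
    by_cases hbl : pvRed rep ∈ blocked <;>
      simp [pvGB, hbl, pvIncrD, PySem.Dict.contains_modify, hcr]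

-- the Option-valued increment fold of A's third loop is the clean pvIncrD fold
lemma pv_incr_fold :
    ∀ (M : List String) (a : PySem.Dict String Int),
      (∀ r ∈ M, a.contains r = true) →
      M.foldl pvIncr (some a) = some (M.foldl pvIncrD a) := by
  intro M
  induction M with
  | nil => simp
  | cons r t ih =>
    intro a h
    simp only [List.foldl_cons]
    have : pvIncr (some a) r = some (pvIncrD a r) := by
      simp [pvIncr, h r (by simp), pvIncrD]
    rw [this]
    apply ih
    intro r' hr'
    simp [pvIncrD, PySem.Dict.contains_modify, h r' (by simp [hr'])]

-- grouping a list by a key over a Nodup key list is a permutation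
lemma pv_flatMap_ite_perm {α : Type} (x : α) (kx : String) (f : String → List α) :
    ∀ (D : List String), D.Nodup → kx ∈ D →
      (D.flatMap (fun u => if kx == u then x :: f u else f u)).Perm (x :: D.flatMap f) := by
  intro D
  induction D with
  | nil => simp
  | cons u t ih =>
    intro hnd hmem
    simp only [List.flatMap_cons]
    by_cases hk : kx = u
    · subst hk
      have hnot : ∀ u' ∈ t, (kx == u') = false := by
        intro u' hu'
        simp only [List.nodup_cons] at hnd
        simp only [beq_eq_false_iff_ne, ne_eq]
        rintro rfl; exact hnd.1 hu'
      have ht : List.flatMap (fun u => if kx == u then x :: f u else f u) t = List.flatMap f t := by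
        apply List.flatMap_congr
        intro u' hu'
        simp [hnot u' hu']
      rw [ht]
      simp
    · have hkx : (kx == u) = false := by simp [hk]
      have hmem' : kx ∈ t := by
        rcases List.mem_cons.1 hmem with h | h
        · exact absurd h hk
        · exact h
      have h1 := (ih (List.nodup_cons.1 hnd).2 hmem').append_left (f u)
      simp only [hkx, Bool.false_eq_true, if_false]
      exact h1.trans List.perm_middle

lemma pv_perm_groups {α : Type} (key : α → String) :
    ∀ (l : List α) (D : List String), D.Nodup → (∀ x ∈ l, key x ∈ D) →
      (D.flatMap (fun u => l.filter (fun x => key x == u))).Perm l := by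
  intro l
  induction l with
  | nil => simp
  | cons x t ih =>
    intro D hnd h
    have hx : key x ∈ D := h x (by simp)
    have hfe : (fun u => (x :: t).filter (fun y => key y == u)) =
        (fun u => if key x == u then x :: t.filter (fun y => key y == u)
                  else t.filter (fun y => key y == u)) := by
      funext u
      by_cases hu : key x = u <;> simp [List.filter_cons, hu]
    rw [hfe]
    exact (pv_flatMap_ite_perm x (key x) _ D hnd hx).trans
      ((ih D hnd (fun y hy => h y (by simp [hy]))).cons x)

-- ===== VERDICT (by name: the statement is the Claim_ definition above) =====
theorem solution_spec : Claim_equal_solution := by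
  intro id_list report k _hdom hpre
  unfold Spec_solution
  -- common data
  set L : List String := PySem.Set.ofList report with hLdef
  have hLmem : ∀ rep ∈ L, rep ∈ report := fun rep h => (PySem.Set.mem_ofList report rep).1 h
  have hpre' : ∀ rep ∈ L, (pvParts rep).length = 2 ∧ pvRed rep ∈ id_list ∧
      (pvRer rep ∈ id_list ∨ pvCnt report (pvRed rep) < k) :=
    fun rep h => hpre rep (hLmem rep h)
  set cntu : String → Int := fun u => (L.countP (fun rep => pvRed rep == u) : Int) with hcnt
  have hcntP : ∀ u, pvCnt report u = cntu u := fun u => rfl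
  -- the shared zero dictionaries
  set d0 : PySem.Dict String (Int × List String) :=
    id_list.foldl (fun d id => d.insert id (0, [])) PySem.Dict.empty with hd0
  set a0 : PySem.Dict String Int :=
    id_list.foldl (fun a id => a.insert id 0) PySem.Dict.empty with ha0
  have hkeys_d0 : d0.keys = PySem.Set.ofList id_list := by
    rw [hd0, PySem.Dict.keys_foldl_insert id_list (fun _ _ => ((0 : Int), ([] : List String)))]
    simp [PySem.Set.update_nil_left]
  have hkeys_a0 : a0.keys = PySem.Set.ofList id_list := by
    rw [ha0, PySem.Dict.keys_foldl_insert id_list (fun _ _ => (0 : Int))]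
    simp [PySem.Set.update_nil_left]
  have hget_a0 : ∀ u, a0.getD u 0 = 0 := by
    intro u
    rw [ha0, PySem.Dict.getD_eq_get?_getD, pv_get?_foldl_insert_const]
    by_cases h : u ∈ id_list <;> simp [h]
  have hget_d0 : ∀ u, d0.getD u (0, []) = (0, []) := by
    intro u
    rw [hd0, PySem.Dict.getD_eq_get?_getD, pv_get?_foldl_insert_const]
    by_cases h : u ∈ id_list <;> simp [h]
  have hcont_a0 : ∀ u ∈ id_list, a0.contains u = true := by
    intro u hu
    rw [PySem.Dict.contains_iff_mem_keys, hkeys_a0, PySem.Set.mem_ofList]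
    exact hu
  have hcont_d0 : ∀ u ∈ id_list, d0.contains u = true := by
    intro u hu
    rw [PySem.Dict.contains_iff_mem_keys, hkeys_d0, PySem.Set.mem_ofList]
    exact hu
  -- ===== side A =====
  have hA2 : L.foldl pvStepDict (some d0) = some (L.foldl pvGA d0) := by
    apply pv_stepDict_fold
    intro rep h
    exact ⟨(hpre' rep h).1, hcont_d0 _ (hpre' rep h).2.1⟩
  set dF : PySem.Dict String (Int × List String) := L.foldl pvGA d0 with hdF
  have hkeys_dF : dF.keys = PySem.Set.ofList id_list := by
    rw [hdF, pv_gA_keys, hkeys_d0]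
    intro rep h
    rw [hkeys_d0, PySem.Set.mem_ofList]
    exact (hpre' rep h).2.1
  have hgetD_dF : ∀ u, dF.getD u (0, []) =
      (cntu u, (L.filter (fun rep => pvRed rep == u)).map pvRer) := by
    intro u
    rw [hdF, pv_gA_getD, hget_d0, hcnt]
    simp
  set lstu : String → List String := fun u => (L.filter (fun rep => pvRed rep == u)).map pvRer with hlst
  -- every reporter of a blocked user is a known id
  have hrer : ∀ rep ∈ L, k ≤ cntu (pvRed rep) → pvRer rep ∈ id_list := by
    intro rep h hk
    rcases (hpre' rep h).2.2 with h1 | h1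
    · exact h1
    · rw [hcntP] at h1
      omega
  -- A's third loop over the final dict
  set LA : List String :=
    (PySem.Set.ofList id_list).flatMap (fun u => if cntu u ≥ k then lstu u else []) with hLA
  have hthird : (PySem.Set.ofList id_list).foldl
      (fun st id => match dF.get? id with
        | some cl => if cl.1 ≥ k then cl.2.foldl pvIncr st else st
        | none => none) (some a0) = LA.foldl pvIncr (some a0) := by
    rw [hLA, List.foldl_flatMap]
    apply PySem.List.foldl_congr_mem
    intro st u hu
    have hgu : dF.get? u = some (dF.getD u (0, [])) := by
      have hc : dF.contains u = true := by
        rw [PySem.Dict.contains_iff_mem_keys, hkeys_dF]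
        exact hu
      rw [PySem.Dict.contains_eq_isSome_get?] at hc
      rcases hg : dF.get? u with _ | v
      · simp [hg] at hc
      · simp [PySem.Dict.getD_eq_get?_getD, hg]
    rw [hgu, hgetD_dF]
    by_cases hk : cntu u ≥ k <;> simp [hk, hlst]
  have hLA_ids : ∀ r ∈ LA, r ∈ id_list := by
    intro r hr
    rw [hLA] at hr
    obtain ⟨u, _, hru⟩ := List.mem_flatMap.1 hr
    by_cases hk : cntu u ≥ k
    · rw [if_pos hk] at hru
      obtain ⟨rep, hrep, hrr⟩ := List.mem_map.1 hru
      have hrepL : rep ∈ L := List.mem_of_mem_filter hrep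
      have hred : pvRed rep = u := by
        have := List.of_mem_filter hrep
        simpa using this
      exact hrr ▸ hrer rep hrepL (by rw [hred]; exact hk)
    · rw [if_neg hk] at hru
      simp at hru
  have hAincr : LA.foldl pvIncr (some a0) = some (LA.foldl pvIncrD a0) := by
    apply pv_incr_fold
    intro r hr
    exact hcont_a0 r (hLA_ids r hr)
  -- ===== side B =====
  have hB1 : L.foldl pvStepCount (some PySem.Dict.empty) =
      some (L.foldl pvGC PySem.Dict.empty) := by
    apply pv_stepCount_fold
    intro rep h
    exact (hpre' rep h).1
  set C : PySem.Dict String Int := L.foldl pvGC PySem.Dict.empty with hC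
  have hkeys_C : C.keys = PySem.Set.ofList (L.map pvRed) := by
    rw [hC, show pvGC = (fun (c : PySem.Dict String Int) (rep : String) =>
          c.insert (pvRed rep) ((fun (c : PySem.Dict String Int) (rep : String) =>
            c.getD (pvRed rep) 0 + 1) c rep)) from rfl,
        PySem.Dict.keys_foldl_insert_key]
    simp [PySem.Set.update_nil_left]
  have hgetD_C : ∀ u, C.getD u 0 = cntu u := by
    intro u
    rw [hC, pv_gC_getD, hcnt]
    simp
  set blocked : PySem.Set String :=
    PySem.Set.ofList ((C.items.filter (fun p => p.2 ≥ k)).map (·.1)) with hbl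
  have hbl_mem : ∀ u, u ∈ blocked ↔ u ∈ C.keys ∧ cntu u ≥ k := by
    intro u
    rw [hbl, PySem.Set.mem_ofList,
      PySem.Dict.items_eq_map_keys C (by rw [hkeys_C]; exact PySem.Set.nodup_ofList _) 0]
    constructor
    · intro h
      obtain ⟨p, hp, hpu⟩ := List.mem_map.1 h
      have hp1 := List.mem_of_mem_filter hp
      have hp2 := List.of_mem_filter hp
      obtain ⟨u', hu', hup⟩ := List.mem_map.1 hp1
      subst hup
      simp only at hpu
      subst hpu
      refine ⟨hu', ?_⟩
      rw [← hgetD_C]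
      simpa using hp2
    · rintro ⟨h1, h2⟩
      apply List.mem_map.2
      refine ⟨(u, C.getD u 0), ?_, rfl⟩
      apply List.mem_filter.2
      refine ⟨List.mem_map.2 ⟨u, h1, rfl⟩, ?_⟩
      simp [hgetD_C, h2]
  have hbl_rep : ∀ rep ∈ L, (pvRed rep ∈ blocked ↔ k ≤ cntu (pvRed rep)) := by
    intro rep h
    rw [hbl_mem]
    have : pvRed rep ∈ C.keys := by
      rw [hkeys_C, PySem.Set.mem_ofList]
      exact List.mem_map.2 ⟨rep, h, rfl⟩
    constructor
    · rintro ⟨_, h2⟩; exact h2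
    · intro h2; exact ⟨this, h2⟩
  have hB2 : L.foldl (pvStepAns blocked) (some a0) = some (L.foldl (pvGB blocked) a0) := by
    apply pv_stepAns_fold
    intro rep h
    refine ⟨(hpre' rep h).1, fun hc => ?_⟩
    have : pvRed rep ∈ blocked := by
      simpa using hc
    exact hcont_a0 _ (hrer rep h ((hbl_rep rep h).1 this))
  -- B's clean fold as an increment list
  have hGB : L.foldl (pvGB blocked) a0 =
      ((L.filter (fun rep => PySem.Set.contains blocked (pvRed rep))).map pvRer).foldl pvIncrD a0 := by
    rw [show L.foldl (pvGB blocked) a0 = L.foldl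
        (fun a rep => if PySem.Set.contains blocked (pvRed rep) then pvIncrD a (pvRer rep) else a) a0 from rfl,
      PySem.List.foldl_if_eq_foldl_filter, List.foldl_map]
  set LB : List String :=
    (L.filter (fun rep => PySem.Set.contains blocked (pvRed rep))).map pvRer with hLB
  -- ===== the two increment lists are permutations =====
  have hperm : LA.Perm LB := by
    have hsplit : ∀ u, (if cntu u ≥ k then lstu u else []) =
        ((L.filter (fun rep => PySem.Set.contains blocked (pvRed rep))).filter
          (fun rep => pvRed rep == u)).map pvRer := by
      intro u
      rw [List.filter_comm]
      by_cases hk : cntu u ≥ k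
      · rw [if_pos hk, hlst]
        have hself : (L.filter (fun rep => pvRed rep == u)).filter
            (fun rep => PySem.Set.contains blocked (pvRed rep)) =
            L.filter (fun rep => pvRed rep == u) := by
          apply List.filter_eq_self.2
          intro rep hrep
          have hrepL : rep ∈ L := List.mem_of_mem_filter hrep
          have hred : pvRed rep = u := by simpa using List.of_mem_filter hrep
          have : pvRed rep ∈ blocked := (hbl_rep rep hrepL).2 (by rw [hred]; exact hk)
          simpa using this
        rw [hself]
      · rw [if_neg hk]
        have : (L.filter (fun rep => pvRed rep == u)).filter
            (fun rep => PySem.Set.contains blocked (pvRed rep)) = [] := by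
          rw [List.filter_eq_nil_iff]
          intro rep hrep
          have hrepL : rep ∈ L := List.mem_of_mem_filter hrep
          have hred : pvRed rep = u := by simpa using List.of_mem_filter hrep
          intro hcon
          have hb : pvRed rep ∈ blocked := by simpa using hcon
          have := (hbl_rep rep hrepL).1 hb
          rw [hred] at this
          omega
        rw [this]
        simp
    have h1 : LA = ((PySem.Set.ofList id_list).flatMap (fun u =>
        (L.filter (fun rep => PySem.Set.contains blocked (pvRed rep))).filter
          (fun rep => pvRed rep == u))).map pvRer := by
      rw [hLA, List.flatMap_congr (fun u _ => hsplit u), List.map_flatMap]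
    rw [h1, hLB]
    apply List.Perm.map
    apply pv_perm_groups
    · exact PySem.Set.nodup_ofList _
    · intro rep hrep
      rw [PySem.Set.mem_ofList]
      exact (hpre' rep (List.mem_of_mem_filter hrep)).2.1
  -- ===== the two final dictionaries have equal value lists =====
  have hvals : ∀ (M : List String), (∀ r ∈ M, r ∈ id_list) →
      (M.foldl pvIncrD a0).values =
        (PySem.Set.ofList id_list).map (fun u => a0.getD u 0 + (M.count u : Int)) := by
    intro M hM
    have hshape : M.foldl pvIncrD a0 =
        M.foldl (fun (d : PySem.Dict String Int) x => d.modify x 0 (fun v => v + 1)) a0 := rfl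
    have hkeysM : (M.foldl pvIncrD a0).keys = PySem.Set.ofList id_list := by
      rw [hshape, PySem.Dict.keys_foldl_modify M 0
        (fun (_ : PySem.Dict String Int) (_ : String) => (fun v => v + 1)) a0,
        hkeys_a0, pv_set_update_self]
      intro r hr
      rw [PySem.Set.mem_ofList]
      exact hM r hr
    rw [PySem.Dict.values_eq_map_keys _ (by rw [hkeysM]; exact PySem.Set.nodup_ofList _) 0,
      hkeysM]
    apply List.map_congr_left
    intro u _
    rw [hshape, PySem.Dict.getD_foldl_modify_add_one]
  have hvalsEq : (LA.foldl pvIncrD a0).values = (LB.foldl pvIncrD a0).values := by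
    rw [hvals LA hLA_ids, hvals LB ?_]
    · apply List.map_congr_left
      intro u _
      rw [hperm.count_eq u]
    · intro r hr
      rw [hLB] at hr
      obtain ⟨rep, hrep, hrr⟩ := List.mem_map.1 hr
      have hrepL : rep ∈ L := List.mem_of_mem_filter hrep
      have hb : pvRed rep ∈ blocked := by simpa using List.of_mem_filter hrep
      exact hrr ▸ hrer rep hrepL ((hbl_rep rep hrepL).1 hb)
  -- ===== reduce the two ports =====
  have hsolA : solution id_list report k = (LA.foldl pvIncrD a0).values := by
    unfold solution
    rw [PySem.List.foldl_prod_mk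
      (f := fun (d : PySem.Dict String (Int × List String)) (id : String) => d.insert id (0, []))
      (g := fun (a : PySem.Dict String Int) (id : String) => a.insert id 0)]
    rw [← hLdef, ← hd0, ← ha0]
    simp only [hA2]
    rw [hkeys_dF, hthird, hAincr]
  have hsolB : solution_alt id_list report k = (LB.foldl pvIncrD a0).values := by
    unfold solution_alt
    rw [← hLdef]
    simp only [hB1]
    rw [← hbl, ← ha0, hB2, hGB]
  rw [hsolA, hsolB, hvalsEq]
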